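-- pv_equiv track=rewrite | github.com/Crone1/Movie-Review-Sentiment-Classification-Using-Sklearn | Sentiment_classification_functions.py | get_document_preview
-- ===== SOURCE A (Python) =====
-- def get_document_preview(document, max_length, sep):
--
--     '''
--     Preview a given number of characters from a given document
--
--     Params:
--         document: list of lists - a list of all tokens in a list of all sentences in a specified document
--         max_length: int - the maximum number of characters to be output in our preview string
--         sep: string - the string used to join the words in the document together in the output - can be a space (" ") or pipe ("|") or other string
--
--     Returns:
--         string - a preview of the specified document that is less than 'max_length' characters long
--     '''
--
--     # iterate through the tokens in the document
--     char_count = 0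
--     reached_limit = False
--     preview_words = []
--     for sentence in document:
--         for token in sentence:
--
--             # check if adding this character would create a string bigger than desired
--             if char_count + len(token) + len(preview_words) > max_length:
--                 reached_limit = True
--                 break
--
--             # add this token to the list of words in our preview
--             preview_words.append(token)
--             char_count += len(token)
--
--         if reached_limit:
--             break
--
--     # create a string from the created list
--     return sep.join(preview_words)
-- ===== SOURCE B (Python) =====
-- def get_document_preview(document, max_length, sep):
--     # Flatten tokens, build a prefix table of (cumulative chars + index) costs,
--     # locate the cutoff, and join the accepted prefix slice.
--     tokens = [t for sentence in document for t in sentence]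
--     costs = []
--     total = 0
--     for i, t in enumerate(tokens):
--         total += len(t)
--         costs.append(total + i)
--     k = len(tokens)
--     for i, c in enumerate(costs):
--         if c > max_length:
--             k = i
--             break
--     return sep.join(tokens[:k])
-- ===== Notes on version B (the rewrite author's own statement) =====
-- stated objective: alternative
-- what changed: Replaces A's nested greedy loop with break-flag propagation by a flatten / prefix-cost-table / cutoff-scan / slice-and-join decomposition over the flattened token list.
import Mathlib
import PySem

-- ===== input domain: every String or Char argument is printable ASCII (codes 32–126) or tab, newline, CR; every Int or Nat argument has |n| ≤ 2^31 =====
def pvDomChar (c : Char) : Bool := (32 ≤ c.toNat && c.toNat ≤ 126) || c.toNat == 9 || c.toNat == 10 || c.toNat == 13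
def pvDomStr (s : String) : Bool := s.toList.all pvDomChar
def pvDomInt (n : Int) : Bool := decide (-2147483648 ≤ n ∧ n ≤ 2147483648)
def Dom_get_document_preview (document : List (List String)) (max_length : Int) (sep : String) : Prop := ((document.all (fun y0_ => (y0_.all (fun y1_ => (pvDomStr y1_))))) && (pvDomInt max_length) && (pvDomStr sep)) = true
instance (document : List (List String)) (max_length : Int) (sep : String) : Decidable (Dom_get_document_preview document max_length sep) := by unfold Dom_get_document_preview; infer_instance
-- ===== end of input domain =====

-- B replaces A's nested greedy loop (break flag across two loops) by a
-- flatten / prefix-cost-table / cutoff-scan / slice-and-join decomposition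
-- (objective: alternative; same asymptotic cost).

-- ===== PORT A =====
-- inner 'for token in sentence' loop: state (char_count, preview_words, reached_limit)
def pvInnerA (ml : Int) : List String → Int → List String → Int × List String × Bool
  | [], cc, pw => (cc, pw, false)
  | t :: rest, cc, pw =>
    if ml < cc + (PySem.Str.len t : Int) + (pw.length : Int) then (cc, pw, true)
    else pvInnerA ml rest (cc + (PySem.Str.len t : Int)) (pw ++ [t])

-- outer 'for sentence in document' loop with the reached_limit break
def pvOuterA (ml : Int) : List (List String) → Int → List String → List String
  | [], _, pw => pw
  | s :: rest, cc, pw =>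
    match pvInnerA ml s cc pw with
    | (cc', pw', reached) => if reached then pw' else pvOuterA ml rest cc' pw'

def get_document_preview (document : List (List String)) (max_length : Int) (sep : String) : String :=
  PySem.Str.join sep (pvOuterA max_length document 0 [])

-- ===== PORT B =====
-- costs[i] = (sum of lengths of tokens[0..i]) + i, built in one pass
def pvCostsB : List String → Int → Int → List Int
  | [], _, _ => []
  | t :: rest, total, i =>
    (total + (PySem.Str.len t : Int) + i) :: pvCostsB rest (total + (PySem.Str.len t : Int)) (i + 1)

-- k = index of the first cost exceeding max_length, else len(costs)
def pvCutB (ml : Int) : List Int → Nat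
  | [] => 0
  | c :: rest => if ml < c then 0 else pvCutB ml rest + 1

def get_document_preview_alt (document : List (List String)) (max_length : Int) (sep : String) : String :=
  PySem.Str.join sep ((document.flatMap (fun sentence => sentence)).take
    (pvCutB max_length (pvCostsB (document.flatMap (fun sentence => sentence)) 0 0)))

-- ===== PRECONDITION & SPEC =====
def Spec_get_document_preview (document : List (List String)) (max_length : Int) (sep : String) (out : String) : Prop := out = get_document_preview_alt document max_length sep
instance (document : List (List String)) (max_length : Int) (sep : String) (out : String) : Decidable (Spec_get_document_preview document max_length sep out) := by unfold Spec_get_document_preview; infer_instance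

-- ===== CLAIM (what is proved, stated in full; the proofs are below) =====
def Claim_equal_get_document_preview : Prop := ∀ (document : List (List String)) (max_length : Int) (sep : String), Dom_get_document_preview document max_length sep → Spec_get_document_preview document max_length sep (get_document_preview document max_length sep)

-- ===== LEMMAS AND PROOFS =====

-- canonical greedy prefix of a token list, from char count cc and word count n
def pvG (ml : Int) : List String → Int → Int → List String
  | [], _, _ => []
  | t :: rest, cc, n =>
    if ml < cc + (PySem.Str.len t : Int) + n then []
    else t :: pvG ml rest (cc + (PySem.Str.len t : Int)) (n + 1)

def pvSumLen (ts : List String) : Int := (ts.map (fun t => (PySem.Str.len t : Int))).sum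

theorem pvG_prefix (ml : Int) (ts : List String) (cc n : Int) : pvG ml ts cc n <+: ts := by
  induction ts generalizing cc n with
  | nil => simp [pvG]
  | cons t rest ih =>
    simp only [pvG]
    split
    · exact List.nil_prefix
    · simpa [List.cons_prefix_cons] using ih _ _

theorem pvG_full (ml : Int) (ts : List String) (cc n : Int)
    (h : (pvG ml ts cc n).length = ts.length) : pvG ml ts cc n = ts :=
  List.IsPrefix.eq_of_length (pvG_prefix ml ts cc n) h

-- B's table-and-cutoff computes the greedy prefix
theorem pvB_eq_G (ml : Int) (ts : List String) (cc n : Int) :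
    ts.take (pvCutB ml (pvCostsB ts cc n)) = pvG ml ts cc n := by
  induction ts generalizing cc n with
  | nil => simp [pvCostsB, pvCutB, pvG]
  | cons t rest ih =>
    simp only [pvCostsB, pvCutB, pvG]
    split
    · simp
    · simp [List.take_succ_cons, ih]

-- A's inner loop in terms of the greedy prefix
theorem pvInnerA_eq (ml : Int) (s : List String) (cc : Int) (pw : List String) :
    pvInnerA ml s cc pw =
      (cc + pvSumLen (pvG ml s cc (pw.length : Int)),
       pw ++ pvG ml s cc (pw.length : Int),
       decide ((pvG ml s cc (pw.length : Int)).length ≠ s.length)) := by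
  induction s generalizing cc pw with
  | nil => simp [pvInnerA, pvG, pvSumLen]
  | cons t rest ih =>
    simp only [pvInnerA, pvG]
    split
    · simp [pvSumLen]
    · rw [ih]
      have hl : ((pw ++ [t]).length : Int) = (pw.length : Int) + 1 := by
        simp
      rw [hl]
      simp [pvSumLen, add_assoc]

-- greedy over an appended list
theorem pvG_append (ml : Int) (s ts : List String) (cc n : Int) :
    pvG ml (s ++ ts) cc n =
      pvG ml s cc n ++
        (if (pvG ml s cc n).length = s.length
         then pvG ml ts (cc + pvSumLen s) (n + (s.length : Int)) else []) := by
  induction s generalizing cc n with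
  | nil => simp [pvG, pvSumLen]
  | cons t rest ih =>
    simp only [List.cons_append, pvG]
    split
    · simp
    · rw [ih]
      by_cases h : (pvG ml rest (cc + (PySem.Str.len t : Int)) (n + 1)).length = rest.length
      · have h' : (t :: pvG ml rest (cc + (PySem.Str.len t : Int)) (n + 1)).length = (t :: rest).length := by
          simp only [List.length_cons, add_left_inj]; exact h
        rw [if_pos h, if_pos h']
        have e1 : cc + (PySem.Str.len t : Int) + pvSumLen rest = cc + pvSumLen (t :: rest) := by
          simp [pvSumLen, add_assoc]
        have e2 : n + 1 + (rest.length : Int) = n + ((t :: rest).length : Int) := by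
          simp only [List.length_cons]; push_cast; ring
        rw [e1, e2, List.cons_append]
      · have h' : ¬ (t :: pvG ml rest (cc + (PySem.Str.len t : Int)) (n + 1)).length = (t :: rest).length := by
          simp only [List.length_cons, add_left_inj]; exact h
        rw [if_neg h, if_neg h']
        simp

-- A's outer loop collects the greedy prefix of the flattened document
theorem pvOuterA_eq (ml : Int) (doc : List (List String)) (cc : Int) (pw : List String) :
    pvOuterA ml doc cc pw =
      pw ++ pvG ml (doc.flatMap (fun s => s)) cc (pw.length : Int) := by
  induction doc generalizing cc pw with
  | nil => simp [pvOuterA, pvG]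
  | cons s rest ih =>
    simp only [pvOuterA, pvInnerA_eq, List.flatMap_cons]
    by_cases h : (pvG ml s cc (pw.length : Int)).length = s.length
    · have hfull : pvG ml s cc (pw.length : Int) = s := pvG_full ml s cc _ h
      have hb : decide ((pvG ml s cc (pw.length : Int)).length ≠ s.length) = false := by simp [h]
      rw [hb]
      simp only [Bool.false_eq_true, if_false]
      rw [ih, pvG_append, if_pos h, hfull]
      have e : (((pw ++ s).length : Nat) : Int) = (pw.length : Int) + (s.length : Int) := by simp
      rw [e, List.append_assoc]
    · have hb : decide ((pvG ml s cc (pw.length : Int)).length ≠ s.length) = true := by simp [h]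
      rw [hb]
      simp only [if_true]
      rw [pvG_append, if_neg h]
      simp

-- ===== VERDICT (by name: the statement is the Claim_ definition above) =====
theorem get_document_preview_spec : Claim_equal_get_document_preview := by
  intro document max_length sep _
  unfold Spec_get_document_preview get_document_preview get_document_preview_alt
  rw [pvOuterA_eq, pvB_eq_G]
  simp
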